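-- pv_equiv track=rewrite | github.com/bbugyi200/dotfiles | home/lib/gai/src/xprompt/_parsing.py | strip_hitl_suffix
-- ===== SOURCE A (Python) =====
-- def strip_hitl_suffix(workflow_ref: str) -> tuple[str, bool | None]:
--     """Extract !! or ?? HITL override suffix from a workflow reference.
--
--     The suffix is expected on the name portion of the reference (before any
--     ``(``, ``:``, or ``+`` delimiter).
--
--     Args:
--         workflow_ref: The workflow reference string (without leading ``#``).
--
--     Returns:
--         Tuple of (cleaned_ref, hitl_override) where hitl_override is True
--         for ``!!``, False for ``??``, or None if no suffix was present.
--     """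
--     # Find name boundary (first (, :, or +)
--     name_end = len(workflow_ref)
--     for i, ch in enumerate(workflow_ref):
--         if ch in ("(", ":", "+"):
--             name_end = i
--             break
--     name_part = workflow_ref[:name_end]
--     rest = workflow_ref[name_end:]
--     if name_part.endswith("!!"):
--         return name_part[:-2] + rest, True
--     if name_part.endswith("??"):
--         return name_part[:-2] + rest, False
--     return workflow_ref, None
-- ===== SOURCE B (Python) =====
-- def strip_hitl_suffix(workflow_ref: str) -> tuple:
--     """Same result as A, by a different decomposition: successive str.partition
--     passes peel the reference into (name, rest) with no index arithmetic, then
--     str.removesuffix drops the HITL marker."""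
--     name, rest = workflow_ref, ""
--     for d in "(:+":
--         name, sep, tail = name.partition(d)
--         rest = sep + tail + rest
--     for suf, flag in (("!!", True), ("??", False)):
--         stripped = name.removesuffix(suf)
--         if stripped != name:
--             return stripped + rest, flag
--     return workflow_ref, None
-- ===== Notes on version B (the rewrite author's own statement) =====
-- stated objective: faster
-- what changed: B never computes a boundary index: it peels the reference by chained str.partition passes, one per delimiter, carrying a (name, rest) pair of substrings, and drops the HITL marker with str.removesuffix in a data-driven suffix/flag loop, replacing A's per-character enumerate-with-break scan plus endswith branches.
import Mathlib
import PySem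

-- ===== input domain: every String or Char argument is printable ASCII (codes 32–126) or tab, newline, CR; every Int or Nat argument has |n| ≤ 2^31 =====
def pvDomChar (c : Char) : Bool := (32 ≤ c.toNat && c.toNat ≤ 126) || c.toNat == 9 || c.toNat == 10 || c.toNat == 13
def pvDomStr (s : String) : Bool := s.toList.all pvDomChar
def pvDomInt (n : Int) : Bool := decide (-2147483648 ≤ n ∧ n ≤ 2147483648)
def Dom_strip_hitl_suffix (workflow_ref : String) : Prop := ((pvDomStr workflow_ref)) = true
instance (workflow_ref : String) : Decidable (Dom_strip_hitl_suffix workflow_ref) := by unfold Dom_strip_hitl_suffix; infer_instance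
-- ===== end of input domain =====

-- B replaces A's per-character boundary-index scan + endswith branches with chained str.partition
-- passes over a (name, rest) substring pair and a removesuffix loop (objective: faster, constant-factor; measured).

-- ===== PORT A =====
-- ch in ("(", ":", "+")
def pvIsDelim (ch : Char) : Bool := ch == '(' || ch == ':' || ch == '+'

-- the 'for i, ch in enumerate(...)' loop with its break: the i of the first delimiter, if any
def pvBoundaryLoop : List (Int × Char) → Option Int
  | [] => none
  | (i, ch) :: rest => if pvIsDelim ch then some i else pvBoundaryLoop rest

def strip_hitl_suffix (workflow_ref : String) : String × Option Bool :=
  let cs := workflow_ref.toList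
  let nameEnd : Int := (pvBoundaryLoop (PySem.List.enumerate cs)).getD (PySem.Chars.len cs)
  let namePart := PySem.Chars.slice cs none (some nameEnd)
  let rest := PySem.Chars.slice cs (some nameEnd) none
  if PySem.Chars.endswith namePart ['!', '!'] then
    (String.ofList (PySem.Chars.slice namePart none (some (-2)) ++ rest), some true)
  else if PySem.Chars.endswith namePart ['?', '?'] then
    (String.ofList (PySem.Chars.slice namePart none (some (-2)) ++ rest), some false)
  else (workflow_ref, none)

-- ===== PORT B =====
-- str.partition(d) for a single-character separator: (before, sep, after) of the first occurrence
def pvPartition (cs : List Char) (d : Char) : List Char × List Char × List Char :=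
  let j := cs.findIdx (· == d)
  if h : j < cs.length then (cs.take j, [cs[j]], cs.drop (j + 1))
  else (cs, [], [])

-- str.removesuffix(suf)
def pvRemoveSuffix (cs suf : List Char) : List Char :=
  if PySem.Chars.endswith cs suf then cs.take (cs.length - suf.length) else cs

-- the 'for suf, flag in (("!!", True), ("??", False))' loop with its early return
def pvSufLoop (orig : String) (name rest : List Char) : List (List Char × Bool) → String × Option Bool
  | [] => (orig, none)
  | (suf, flag) :: more =>
    let stripped := pvRemoveSuffix name suf
    if stripped ≠ name then (String.ofList (stripped ++ rest), some flag)
    else pvSufLoop orig name rest more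

def strip_hitl_suffix_alt (workflow_ref : String) : String × Option Bool :=
  let cs := workflow_ref.toList
  let nr := ['(', ':', '+'].foldl
    (fun (p : List Char × List Char) d =>
      let (name, sep, tail) := pvPartition p.1 d
      (name, sep ++ tail ++ p.2))
    (cs, ([] : List Char))
  pvSufLoop workflow_ref nr.1 nr.2 [(['!', '!'], true), (['?', '?'], false)]

-- ===== PRECONDITION & SPEC =====
def Spec_strip_hitl_suffix (workflow_ref : String) (out : String × Option Bool) : Prop := out = strip_hitl_suffix_alt workflow_ref
instance (workflow_ref : String) (out : String × Option Bool) : Decidable (Spec_strip_hitl_suffix workflow_ref out) := by unfold Spec_strip_hitl_suffix; infer_instance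

-- ===== CLAIM (what is proved, stated in full; the proofs are below) =====
def Claim_equal_strip_hitl_suffix : Prop := ∀ (workflow_ref : String), Dom_strip_hitl_suffix workflow_ref → Spec_strip_hitl_suffix workflow_ref (strip_hitl_suffix workflow_ref)

-- ===== LEMMAS AND PROOFS =====

-- A's loop over 'enumerate' finds the first delimiter index (shifted by the start index)
theorem pvBoundaryLoop_enumerate (cs : List Char) (k : Int) :
    pvBoundaryLoop (PySem.List.enumerate cs k)
      = if cs.findIdx pvIsDelim < cs.length then some (k + (cs.findIdx pvIsDelim : Int))
        else none := by
  induction cs generalizing k with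
  | nil => simp [PySem.List.enumerate_nil, pvBoundaryLoop]
  | cons c cs ih =>
    rw [PySem.List.enumerate_cons]
    by_cases h : pvIsDelim c
    · simp [pvBoundaryLoop, h, List.findIdx_cons]
    · simp only [pvBoundaryLoop, h, List.findIdx_cons, cond_false, Bool.false_eq_true,
        ite_false, ih (k + 1), List.length_cons]
      by_cases hlt : cs.findIdx pvIsDelim < cs.length
      · rw [if_pos hlt, if_pos (by omega)]
        congr 1
        push_cast
        ring
      · rw [if_neg hlt, if_neg (by omega)]

-- B's partition of the name part, component-wise: the part before / from the first occurrence
theorem pvPartition_fst (l : List Char) (d : Char) :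
    (pvPartition l d).1 = l.take (l.findIdx (· == d)) := by
  unfold pvPartition
  by_cases h : l.findIdx (· == d) < l.length
  · rw [dif_pos h]
  · rw [dif_neg h]
    have hlen : l.findIdx (· == d) = l.length := le_antisymm List.findIdx_le_length (by omega)
    simp [hlen]

theorem pvPartition_snd (l : List Char) (d : Char) :
    (pvPartition l d).2.1 ++ (pvPartition l d).2.2 = l.drop (l.findIdx (· == d)) := by
  unfold pvPartition
  by_cases h : l.findIdx (· == d) < l.length
  · rw [dif_pos h]
    exact (List.drop_eq_getElem_cons h).symm
  · rw [dif_neg h]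
    have hlen : l.findIdx (· == d) = l.length := le_antisymm List.findIdx_le_length (by omega)
    simp [hlen]

-- pushing a later partition step through an earlier one: drops recombine
theorem pv_drop_recombine (l : List Char) (j m : Nat) (h : j ≤ m) :
    (l.take m).drop j ++ l.drop m = l.drop j := by
  rw [List.drop_take]
  have : l.drop m = (l.drop j).drop (m - j) := by
    rw [List.drop_drop]
    congr 1
    omega
  rw [this, List.take_append_drop]

-- B's three-step partition fold computes (take K, drop K) at the first-delimiter index K
theorem pv_fold_eq (cs : List Char) :
    (['(', ':', '+'].foldl
      (fun (p : List Char × List Char) d =>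
        let (name, sep, tail) := pvPartition p.1 d
        (name, sep ++ tail ++ p.2))
      (cs, ([] : List Char)))
      = (cs.take (cs.findIdx pvIsDelim), cs.drop (cs.findIdx pvIsDelim)) := by
  have hK : cs.findIdx pvIsDelim
      = min (min (cs.findIdx (· == '(')) (cs.findIdx (· == ':'))) (cs.findIdx (· == '+')) := by
    rw [List.min_findIdx_findIdx, List.min_findIdx_findIdx]
    rfl
  set a := cs.findIdx (· == '(') with ha
  set b := cs.findIdx (· == ':') with hb
  set c := cs.findIdx (· == '+') with hc
  simp only [List.foldl, pvPartition_fst, pvPartition_snd, List.append_nil, List.findIdx_take,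
    List.take_take, ← ha, ← hb, ← hc]
  rw [pv_drop_recombine cs _ _ (by omega)]
  have e1 : min (min a b) a = min a b := by omega
  rw [e1]
  have e2 : min (min (min a b) c) (min a b) = min (min a b) c := by omega
  rw [e2, pv_drop_recombine cs _ _ (by omega), hK]
-- removesuffix on a two-character suffix: 'stripped != name' is exactly endswith, and the
-- stripped value is A's name[:-2] slice
theorem pv_removeSuffix_ne_iff (name : List Char) (a b : Char) :
    (pvRemoveSuffix name [a, b] ≠ name ↔ PySem.Chars.endswith name [a, b] = true) ∧
    (PySem.Chars.endswith name [a, b] = true →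
      pvRemoveSuffix name [a, b] = PySem.List.slice name none (some (-2))) := by
  by_cases h : PySem.Chars.endswith name [a, b] = true
  · have hlen : 2 ≤ name.length := by
      have := (PySem.Chars.endswith_iff name [a, b]).mp h
      have := this.length_le
      simpa using this
    have hval : pvRemoveSuffix name [a, b] = name.take (name.length - 2) := by
      simp [pvRemoveSuffix, h]
    refine ⟨⟨fun _ => h, fun _ hc => ?_⟩, fun _ => ?_⟩
    · have : (name.take (name.length - 2)).length = name.length - 2 := by
        simp
      rw [hval] at hc
      have := congrArg List.length hc
      omega
    · rw [hval, PySem.List.slice_to_neg_ofNat name 2 (by omega)]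
  · constructor
    · simp [pvRemoveSuffix, h]
    · intro hc; exact absurd hc h

-- ===== VERDICT (by name: the statement is the Claim_ definition above) =====
theorem strip_hitl_suffix_spec : Claim_equal_strip_hitl_suffix := by
  intro s _
  unfold Spec_strip_hitl_suffix strip_hitl_suffix strip_hitl_suffix_alt
  dsimp only
  rw [pv_fold_eq]
  set cs := s.toList with hcs
  have hK : cs.findIdx pvIsDelim ≤ cs.length := List.findIdx_le_length
  have hA : (pvBoundaryLoop (PySem.List.enumerate cs)).getD (PySem.Chars.len cs)
      = ((cs.findIdx pvIsDelim : Nat) : Int) := by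
    rw [show PySem.List.enumerate cs = PySem.List.enumerate cs 0 from rfl,
        pvBoundaryLoop_enumerate]
    by_cases h : cs.findIdx pvIsDelim < cs.length
    · rw [if_pos h]; simp
    · rw [if_neg h]
      simp only [Option.getD_none, PySem.Chars.len_eq]
      congr 1
      omega
  rw [hA]
  simp only [PySem.Chars.slice_eq_listSlice]
  rw [PySem.List.slice_to_natCast, PySem.List.slice_from_natCast]
  set name := cs.take (cs.findIdx pvIsDelim) with hname
  set rest := cs.drop (cs.findIdx pvIsDelim) with hrest
  simp only [pvSufLoop]
  obtain ⟨hb_iff, hb_val⟩ := pv_removeSuffix_ne_iff name '!' '!'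
  obtain ⟨hq_iff, hq_val⟩ := pv_removeSuffix_ne_iff name '?' '?'
  by_cases hb : PySem.Chars.endswith name ['!', '!'] = true
  · rw [if_pos hb, if_pos (hb_iff.mpr hb), hb_val hb]
  · rw [if_neg hb, if_neg (fun hc => hb (hb_iff.mp hc))]
    by_cases hq : PySem.Chars.endswith name ['?', '?'] = true
    · rw [if_pos hq, if_pos (hq_iff.mpr hq), hq_val hq]
    · rw [if_neg hq, if_neg (fun hc => hq (hq_iff.mp hc))]
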